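-- pv_equiv track=rewrite | github.com/Jjiggu/Programmers | 프로그래머스/1/134240. 푸드 파이트 대회/푸드 파이트 대회.py | solution
-- ===== SOURCE A (Python) =====
-- def solution(food):
--     answer = ''
--
--     for i in range(1, len(food)):
--         count = int(food[i]) // 2
--         for j in range(count):
--             answer = answer + str(i)
--
--     answer = answer + str(0)
--
--     for k in range(len(food)-1, 0, -1):
--         count = food[k] // 2
--         for h in range(count):
--             answer = answer + str(k)
--
--
--     return answer
-- ===== SOURCE B (Python) =====
-- def solution(food):
--     # Build the palindrome inside-out: start from the core ['0'] and wrap it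
--     # with the token str(i) * (food[i] // 2) on both sides, for i = n-1 .. 1;
--     # join the token list once at the end.
--     parts = ['0']
--     for i in range(len(food) - 1, 0, -1):
--         t = str(i) * (food[i] // 2)
--         parts = [t] + parts + [t]
--     return ''.join(parts)
-- ===== Notes on version B (the rewrite author's own statement) =====
-- stated objective: faster
-- what changed: Replaces A's two staged loops that append str(i) one copy at a time (ascending pass, '0', descending pass over the same counts) by a single loop that builds the palindrome inside-out, wrapping a token list that starts as ['0'] with tok(i)=str(i)*(food[i]//2) on both sides and joining once at the end.
import Mathlib
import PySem

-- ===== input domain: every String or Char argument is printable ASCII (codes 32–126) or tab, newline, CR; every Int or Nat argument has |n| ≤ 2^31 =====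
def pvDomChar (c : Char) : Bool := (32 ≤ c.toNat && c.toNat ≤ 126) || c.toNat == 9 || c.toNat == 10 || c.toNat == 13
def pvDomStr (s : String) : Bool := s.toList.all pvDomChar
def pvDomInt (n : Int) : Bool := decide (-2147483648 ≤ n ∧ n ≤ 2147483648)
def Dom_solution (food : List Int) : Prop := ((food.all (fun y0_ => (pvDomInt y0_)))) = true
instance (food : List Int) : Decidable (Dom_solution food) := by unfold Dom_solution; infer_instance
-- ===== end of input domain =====

-- B builds the palindrome inside-out: one loop wraps a core starting as '0' with tok(i) on both
-- sides (joined once at the end), instead of A's two staged per-repetition append loops; equal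
-- return value, measured constant-factor speedup from building each token once.

-- ===== PORT A =====
-- answer is kept as a List Char (exact: str(i) is PySem.Int.toChars); int(food[i]) on an int is the identity.
def solution (food : List Int) : String :=
  let answer : List Char := []
  let answer := (PySem.List.pyRange 1 (PySem.List.len food) 1).foldl (fun answer i =>
      let count := PySem.Int.floordiv (PySem.List.pyGetD food i 0) 2
      (PySem.List.pyRange 0 count 1).foldl (fun answer _ => answer ++ PySem.Int.toChars i) answer) answer
  let answer := answer ++ PySem.Int.toChars 0
  let answer := (PySem.List.pyRange (PySem.List.len food - 1) 0 (-1)).foldl (fun answer k =>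
      let count := PySem.Int.floordiv (PySem.List.pyGetD food k 0) 2
      (PySem.List.pyRange 0 count 1).foldl (fun answer _ => answer ++ PySem.Int.toChars k) answer) answer
  String.ofList answer

-- ===== PORT B =====
-- single inside-out loop over a token list: parts starts as ['0'] and each step wraps it as
-- [t] ++ parts ++ [t]; str(i)*count is PySem.List.pyRepeat (toChars i) count; ''.join is flatten.
def solution_alt (food : List Int) : String :=
  let parts : List (List Char) := [PySem.Int.toChars 0]
  let parts := (PySem.List.pyRange (PySem.List.len food - 1) 0 (-1)).foldl (fun parts i =>
      let t := PySem.List.pyRepeat (PySem.Int.toChars i) (PySem.Int.floordiv (PySem.List.pyGetD food i 0) 2)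
      [t] ++ parts ++ [t]) parts
  String.ofList parts.flatten

-- ===== PRECONDITION & SPEC =====
def Spec_solution (food : List Int) (out : String) : Prop := out = solution_alt food
instance (food : List Int) (out : String) : Decidable (Spec_solution food out) := by unfold Spec_solution; infer_instance

-- ===== CLAIM (what is proved, stated in full; the proofs are below) =====
def Claim_equal_solution : Prop := ∀ (food : List Int), Dom_solution food → Spec_solution food (solution food)

-- ===== LEMMAS AND PROOFS =====

-- an inner 'for j in range(count): answer += t' appends t count times
theorem pv_foldl_const_append {α : Type} (t : List α) :
    ∀ (m : Nat) (acc : List α), (List.range m).foldl (fun a _ => a ++ t) acc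
      = acc ++ (List.replicate m t).flatten := by
  intro m
  induction m with
  | zero => intro acc; simp
  | succ k ih =>
      intro acc
      rw [List.range_succ, List.foldl_append, ih, List.replicate_succ']
      simp

theorem pv_inner (c : Int) (t acc : List Char) :
    (PySem.List.pyRange 0 c 1).foldl (fun a _ => a ++ t) acc = acc ++ PySem.List.pyRepeat t c := by
  rw [PySem.List.pyRange_one, List.foldl_map]
  have : (c - 0).toNat = c.toNat := by omega
  rw [this, pv_foldl_const_append]
  simp [PySem.List.pyRepeat]

-- the shared token of index i
def pv_tok (food : List Int) (i : Int) : List Char :=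
  PySem.List.pyRepeat (PySem.Int.toChars i) (PySem.Int.floordiv (PySem.List.pyGetD food i 0) 2)

theorem pv_outer (food : List Int) (r : List Int) (acc : List Char) :
    r.foldl (fun answer i =>
        let count := PySem.Int.floordiv (PySem.List.pyGetD food i 0) 2
        (PySem.List.pyRange 0 count 1).foldl (fun answer _ => answer ++ PySem.Int.toChars i) answer) acc
      = acc ++ (r.map (pv_tok food)).flatten := by
  induction r generalizing acc with
  | nil => simp
  | cons x xs ih =>
      rw [List.foldl_cons, pv_inner, ih, List.map_cons, List.flatten_cons, List.append_assoc]
      rfl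

-- B's wrapping loop equals mirrored token lists around the core
theorem pv_wrap_foldl (food : List Int) (r : List Int) (core : List (List Char)) :
    r.foldl (fun parts i =>
        let t := PySem.List.pyRepeat (PySem.Int.toChars i) (PySem.Int.floordiv (PySem.List.pyGetD food i 0) 2)
        [t] ++ parts ++ [t]) core
      = r.reverse.map (pv_tok food) ++ core ++ r.map (pv_tok food) := by
  induction r generalizing core with
  | nil => simp
  | cons x xs ih =>
      rw [List.foldl_cons, ih]
      simp [pv_tok, List.append_assoc]

theorem solution_eq_alt (food : List Int) : solution food = solution_alt food := by
  unfold solution solution_alt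
  dsimp only
  rw [pv_outer, pv_outer, PySem.List.pyRange_neg_one_eq_reverse, pv_wrap_foldl]
  have h : (0 : Int) + 1 = 1 := by norm_num
  have h2 : PySem.List.len food - 1 + 1 = PySem.List.len food := by ring
  rw [h, h2]
  simp [List.append_assoc]

-- ===== VERDICT (by name: the statement is the Claim_ definition above) =====
theorem solution_spec : Claim_equal_solution := by
  intro food _
  unfold Spec_solution
  exact solution_eq_alt food
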